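-- pv_equiv track=rewrite | github.com/Levis0045/SCIA-CRF_LF | experimentations/sangkak_estimators.py | build_data_model
-- ===== SOURCE A (Python) =====
-- from collections import defaultdict
--
-- def build_data_model(extract_data):
--     group_by_entities = defaultdict(list)
--
--     # group words of the sentence by tag
--     words = []
--     for sent in extract_data:
--         for i, wd in enumerate(sent):
--             if wd[0] not in words:
--                 group_by_entities[wd[1]].append((wd, i))
--                 words.append(wd[0])
--             elif  wd[0] in words and wd[1] not in group_by_entities.keys():
--                 group_by_entities[wd[1]].append((wd, i))
--     del words
--
--     # group tag by word and its position in sentence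
--     group_by_position_tag = {}
--     for tag, list_values in dict(group_by_entities).items():
--         group_by_position = defaultdict(list)
--         for wd in list_values: group_by_position[wd[1]].append(wd[0][0])
--         group_by_position_tag[tag] = group_by_position
--
--     return group_by_position_tag
-- ===== SOURCE B (Python) =====
-- def build_data_model(extract_data):
--     # single pass: build the nested tag -> {position -> [words]} dict directly
--     seen = set()
--     result = {}
--     for sent in extract_data:
--         for i, wd in enumerate(sent):
--             if wd[0] not in seen:
--                 result.setdefault(wd[1], {}).setdefault(i, []).append(wd[0])
--                 seen.add(wd[0])
--             elif wd[1] not in result: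
--                 result.setdefault(wd[1], {}).setdefault(i, []).append(wd[0])
--     return result
-- ===== Notes on version B (the rewrite author's own statement) =====
-- stated objective: simpler
-- what changed: B builds the nested tag -> {position -> [words]} dict directly in a single pass with a seen-set, eliminating A's intermediate flat group_by_entities list and the entire second reshaping loop.
import Mathlib
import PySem

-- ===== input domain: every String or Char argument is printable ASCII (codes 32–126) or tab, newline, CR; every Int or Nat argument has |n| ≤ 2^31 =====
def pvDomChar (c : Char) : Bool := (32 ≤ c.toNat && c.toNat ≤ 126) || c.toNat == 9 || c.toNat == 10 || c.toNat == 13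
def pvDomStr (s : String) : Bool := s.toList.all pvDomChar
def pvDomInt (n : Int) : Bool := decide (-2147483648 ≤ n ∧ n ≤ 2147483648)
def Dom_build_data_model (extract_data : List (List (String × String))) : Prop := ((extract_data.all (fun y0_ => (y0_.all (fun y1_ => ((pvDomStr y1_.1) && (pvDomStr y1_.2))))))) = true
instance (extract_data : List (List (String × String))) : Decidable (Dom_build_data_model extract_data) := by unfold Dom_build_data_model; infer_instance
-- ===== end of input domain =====

-- B fuses A's two passes into one: it builds the nested tag -> {position -> [words]} dict directly,
-- with no intermediate flat grouping list and no reshaping loop (objective: simpler).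

-- ===== PORT A =====
-- one step of A's first loop: state = (group_by_entities, words), input = (i, wd)
def pvAStep (st : PySem.Dict String (List ((String × String) × Int)) × List String)
    (p : Int × (String × String)) :
    PySem.Dict String (List ((String × String) × Int)) × List String :=
  if st.2.contains p.2.1 = false then
    (st.1.modify p.2.2 [] (· ++ [(p.2, p.1)]), st.2 ++ [p.2.1])
  else if st.2.contains p.2.1 = true ∧ st.1.contains p.2.2 = false then
    (st.1.modify p.2.2 [] (· ++ [(p.2, p.1)]), st.2)
  else st

-- A's inner reshaping loop: 'for wd in list_values: group_by_position[wd[1]].append(wd[0][0])'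
def pvGroupPos (lv : List ((String × String) × Int)) : PySem.Dict Int (List String) :=
  lv.foldl (fun d wd => d.modify wd.2 [] (· ++ [wd.1.1])) PySem.Dict.empty

def build_data_model (extract_data : List (List (String × String))) :
    List (String × List (Int × List String)) :=
  let st := extract_data.foldl
      (fun st sent => (PySem.List.enumerate sent 0).foldl pvAStep st)
      (PySem.Dict.empty, [])
  let group_by_position_tag := st.1.items.foldl
      (fun (acc : PySem.Dict String (PySem.Dict Int (List String))) tv =>
        acc.insert tv.1 (pvGroupPos tv.2))
      PySem.Dict.empty
  group_by_position_tag.items.map (fun p => (p.1, p.2.items))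

-- ===== PORT B =====
-- one step of B's single loop: state = (result, seen), input = (i, wd)
def pvBStep (st : PySem.Dict String (PySem.Dict Int (List String)) × PySem.Set String)
    (p : Int × (String × String)) :
    PySem.Dict String (PySem.Dict Int (List String)) × PySem.Set String :=
  if PySem.Set.contains st.2 p.2.1 = false then
    (st.1.modify p.2.2 PySem.Dict.empty (fun d => d.modify p.1 [] (· ++ [p.2.1])),
     PySem.Set.add st.2 p.2.1)
  else if st.1.contains p.2.2 = false then
    (st.1.modify p.2.2 PySem.Dict.empty (fun d => d.modify p.1 [] (· ++ [p.2.1])), st.2)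
  else st

def build_data_model_alt (extract_data : List (List (String × String))) :
    List (String × List (Int × List String)) :=
  let st := extract_data.foldl
      (fun st sent => (PySem.List.enumerate sent 0).foldl pvBStep st)
      (PySem.Dict.empty, PySem.Set.empty)
  st.1.items.map (fun p => (p.1, p.2.items))

-- ===== PRECONDITION & SPEC =====
def Spec_build_data_model (extract_data : List (List (String × String))) (out : List (String × List (Int × List String))) : Prop := out = build_data_model_alt extract_data
instance (extract_data : List (List (String × String))) (out : List (String × List (Int × List String))) : Decidable (Spec_build_data_model extract_data out) := by unfold Spec_build_data_model; infer_instance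

-- ===== CLAIM (what is proved, stated in full; the proofs are below) =====
def Claim_equal_build_data_model : Prop := ∀ (extract_data : List (List (String × String))), Dom_build_data_model extract_data → Spec_build_data_model extract_data (build_data_model extract_data)

-- ===== LEMMAS AND PROOFS =====

-- reshaping A's intermediate dict value-wise
def pvReshape (g : PySem.Dict String (List ((String × String) × Int))) :
    PySem.Dict String (PySem.Dict Int (List String)) :=
  PySem.Dict.mk (g.items.map (fun tv => (tv.1, pvGroupPos tv.2)))

lemma pv_get?_mk_map {β γ : Type} (l : List (String × β)) (f : β → γ) (t : String) :
    (PySem.Dict.mk (l.map (fun p => (p.1, f p.2)))).get? t = ((PySem.Dict.mk l).get? t).map f := by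
  induction l with
  | nil => simp [PySem.Dict.get?]
  | cons a l ih =>
    obtain ⟨k, v⟩ := a
    simp only [List.map_cons, PySem.Dict.get?_mk_cons]
    by_cases h : (k == t) = true <;> simp [h, ih]

lemma pv_reshape_get? (g : PySem.Dict String (List ((String × String) × Int))) (t : String) :
    (pvReshape g).get? t = (g.get? t).map pvGroupPos := by
  cases g; exact pv_get?_mk_map _ _ _

lemma pv_reshape_contains (g : PySem.Dict String (List ((String × String) × Int))) (t : String) :
    (pvReshape g).contains t = g.contains t := by
  rw [PySem.Dict.contains_eq_isSome_get?, PySem.Dict.contains_eq_isSome_get?, pv_reshape_get?]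
  cases g.get? t <;> rfl

lemma pv_reshape_getD (g : PySem.Dict String (List ((String × String) × Int))) (t : String) :
    (pvReshape g).getD t PySem.Dict.empty = pvGroupPos (g.getD t []) := by
  rw [PySem.Dict.getD_eq_get?_getD, PySem.Dict.getD_eq_get?_getD, pv_reshape_get?]
  cases g.get? t <;> rfl

lemma pv_groupPos_append (lv : List ((String × String) × Int)) (x : (String × String) × Int) :
    pvGroupPos (lv ++ [x]) = (pvGroupPos lv).modify x.2 [] (· ++ [x.1.1]) := by
  simp [pvGroupPos, List.foldl_append]

-- the key commutation: reshaping after A's defaultdict-append step equals B's nested-modify step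
lemma pv_reshape_modify (g : PySem.Dict String (List ((String × String) × Int)))
    (w t : String) (i : Int) :
    pvReshape (g.modify t [] (· ++ [((w, t), i)]))
      = (pvReshape g).modify t PySem.Dict.empty (fun d => d.modify i [] (· ++ [w])) := by
  show pvReshape (g.insert t (g.getD t [] ++ [((w, t), i)]))
      = (pvReshape g).insert t
          (((pvReshape g).getD t PySem.Dict.empty).modify i [] (· ++ [w]))
  apply PySem.Dict.ext
  by_cases hc : g.contains t = true
  · have hc' : (pvReshape g).contains t = true := by rw [pv_reshape_contains]; exact hc
    show ((g.insert t (g.getD t [] ++ [((w, t), i)])).items.map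
        (fun tv => (tv.1, pvGroupPos tv.2))) = _
    rw [PySem.Dict.items_insert_of_contains _ _ hc,
        PySem.Dict.items_insert_of_contains _ _ hc', pv_reshape_getD]
    show _ = (g.items.map (fun tv => (tv.1, pvGroupPos tv.2))).map _
    rw [List.map_map, List.map_map]
    apply List.map_congr_left
    intro p _
    by_cases hp : (p.1 == t) = true
    · simp only [Function.comp, hp, if_pos]
      have h := pv_groupPos_append (g.getD t []) ((w, t), i)
      simp [h]
    · simp [Function.comp, hp]
  · have hcf : g.contains t = false := by revert hc; cases h : g.contains t <;> simp
    have hc' : (pvReshape g).contains t = false := by rw [pv_reshape_contains]; exact hcf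
    show ((g.insert t (g.getD t [] ++ [((w, t), i)])).items.map
        (fun tv => (tv.1, pvGroupPos tv.2))) = _
    rw [PySem.Dict.items_insert_of_not_contains _ _ hcf,
        PySem.Dict.items_insert_of_not_contains _ _ hc',
        pv_reshape_getD, PySem.Dict.getD_of_not_contains _ _ hcf]
    simp [pvReshape]
    rfl

-- pvAStep and pvBStep simulate each other through pvReshape
def pvRel (a : PySem.Dict String (List ((String × String) × Int)) × List String)
    (b : PySem.Dict String (PySem.Dict Int (List String)) × PySem.Set String) : Prop :=
  b.1 = pvReshape a.1 ∧ (∀ w : String, PySem.Set.contains b.2 w = a.2.contains w)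

lemma pv_rel_step (a : PySem.Dict String (List ((String × String) × Int)) × List String)
    (b : PySem.Dict String (PySem.Dict Int (List String)) × PySem.Set String)
    (p : Int × (String × String)) (h : pvRel a b) : pvRel (pvAStep a p) (pvBStep b p) := by
  obtain ⟨hb1, hb2⟩ := h
  have hmod : pvReshape (a.1.modify p.2.2 [] (· ++ [(p.2, p.1)]))
      = b.1.modify p.2.2 PySem.Dict.empty (fun d => d.modify p.1 [] (· ++ [p.2.1])) := by
    rw [hb1]
    exact pv_reshape_modify a.1 p.2.1 p.2.2 p.1
  unfold pvAStep pvBStep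
  rw [hb1, pv_reshape_contains, hb2 p.2.1, ← hb1]
  by_cases h1 : a.2.contains p.2.1 = false
  · rw [if_pos h1, if_pos h1]
    refine ⟨hmod.symm, fun w => ?_⟩
    have hadd : PySem.Set.add b.2 p.2.1 = b.2 ++ [p.2.1] := by
      show (if PySem.Set.contains b.2 p.2.1 then b.2 else b.2 ++ [p.2.1]) = _
      rw [hb2 p.2.1, h1]
      simp
    show PySem.Set.contains (PySem.Set.add b.2 p.2.1) w = List.contains (a.2 ++ [p.2.1]) w
    rw [hadd]
    show List.contains (b.2 ++ [p.2.1]) w = List.contains (a.2 ++ [p.2.1]) w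
    simp only [List.contains_append]
    rw [show List.contains b.2 w = PySem.Set.contains b.2 w from rfl, hb2 w]
  · have h1' : a.2.contains p.2.1 = true := by revert h1; cases a.2.contains p.2.1 <;> simp
    rw [if_neg h1, if_neg h1]
    by_cases h2 : a.1.contains p.2.2 = false
    · rw [if_pos h2, if_pos ⟨h1', h2⟩]
      exact ⟨hmod.symm, hb2⟩
    · rw [if_neg h2, if_neg (fun hh => h2 hh.2)]
      exact ⟨hb1, hb2⟩

lemma pv_rel_foldl_inner (l : List (Int × (String × String))) :
    ∀ a b, pvRel a b → pvRel (l.foldl pvAStep a) (l.foldl pvBStep b) := by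
  induction l with
  | nil => intro a b h; exact h
  | cons x l ih => intro a b h; exact ih _ _ (pv_rel_step a b x h)

lemma pv_rel_foldl (data : List (List (String × String))) :
    ∀ a b, pvRel a b →
      pvRel (data.foldl (fun st sent => (PySem.List.enumerate sent 0).foldl pvAStep st) a)
            (data.foldl (fun st sent => (PySem.List.enumerate sent 0).foldl pvBStep st) b) := by
  induction data with
  | nil => intro a b h; exact h
  | cons s data ih => intro a b h; exact ih _ _ (pv_rel_foldl_inner _ a b h)

-- A's first-phase dict keeps Nodup keys (it is built by modify steps from empty)
lemma pv_astep_nodup (a : PySem.Dict String (List ((String × String) × Int)) × List String)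
    (p : Int × (String × String)) (h : a.1.keys.Nodup) :
    (pvAStep a p).1.keys.Nodup := by
  unfold pvAStep
  split_ifs <;>
    first
      | exact h
      | · show (a.1.modify p.2.2 [] (· ++ [(p.2, p.1)])).keys.Nodup
          rw [PySem.Dict.keys_modify]
          exact PySem.Dict.nodup_keys_insert _ _ _ h

lemma pv_inner_nodup (l : List (Int × (String × String))) :
    ∀ a : PySem.Dict String (List ((String × String) × Int)) × List String, a.1.keys.Nodup →
      (l.foldl pvAStep a).1.keys.Nodup := by
  induction l with
  | nil => intro a ha; exact ha
  | cons x l ih => intro a ha; exact ih _ (pv_astep_nodup a x ha)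

lemma pv_final_nodup (data : List (List (String × String))) :
    ∀ a : PySem.Dict String (List ((String × String) × Int)) × List String, a.1.keys.Nodup →
      (data.foldl (fun st sent => (PySem.List.enumerate sent 0).foldl pvAStep st) a).1.keys.Nodup := by
  induction data with
  | nil => intro a ha; exact ha
  | cons s data ih => intro a ha; exact ih _ (pv_inner_nodup _ a ha)

-- A's reshaping loop over a Nodup-keys dict is pvReshape
lemma pv_reshape_fold (g : PySem.Dict String (List ((String × String) × Int)))
    (h : g.keys.Nodup) :
    g.items.foldl
      (fun (acc : PySem.Dict String (PySem.Dict Int (List String))) tv =>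
        acc.insert tv.1 (pvGroupPos tv.2)) PySem.Dict.empty = pvReshape g := by
  apply PySem.Dict.ext
  rw [PySem.Dict.items_foldl_insert_fresh g.items (fun tv => tv.1) (fun tv => pvGroupPos tv.2)
      PySem.Dict.empty (fun a _ => rfl) h]
  simp [pvReshape, PySem.Dict.empty]

-- ===== VERDICT (by name: the statement is the Claim_ definition above) =====
theorem build_data_model_spec : Claim_equal_build_data_model := by
  intro data _
  have hrel := pv_rel_foldl data (PySem.Dict.empty, []) (PySem.Dict.empty, PySem.Set.empty)
    ⟨rfl, fun w => rfl⟩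
  have hnd := pv_final_nodup data (PySem.Dict.empty, []) (by simp [PySem.Dict.empty, PySem.Dict.keys])
  show List.map (fun p => (p.1, p.2.items))
      ((List.foldl (fun acc tv => acc.insert tv.1 (pvGroupPos tv.2)) PySem.Dict.empty
        ((List.foldl (fun st sent => List.foldl pvAStep st (PySem.List.enumerate sent 0))
          (PySem.Dict.empty, []) data).1.items)).items)
    = List.map (fun p => (p.1, p.2.items))
      ((List.foldl (fun st sent => List.foldl pvBStep st (PySem.List.enumerate sent 0))
        (PySem.Dict.empty, PySem.Set.empty) data).1.items)
  rw [pv_reshape_fold _ hnd, ← hrel.1]
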